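-- pv_equiv track=rewrite | github.com/maxfie1d/atcoder | scope.py | solve
-- ===== SOURCE A (Python) =====
-- def solve(S):
--     stack = []
--     bag = set()
--     for i in range(len(S)):
--         c = S[i]
--         if c == "(":
--             stack.append(i)
--         if c.islower():
--             if c in bag:
--                 return "No"
--             else:
--                 bag.add(c)
--         if c == ")":
--             j = stack.pop()
--             for n in range(i - 1, j, -1):
--                 cc = S[n]
--                 if cc == ')':
--                     break
--                 if cc in bag:
--                     bag.remove(cc)
--     return "Yes"
-- ===== SOURCE B (Python) =====
-- def solve(S):
--     stack = []
--     bag = set()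
--     pending = []
--     for c in S:
--         if c == "(":
--             stack.append(0)
--             pending = []
--         elif c == ")":
--             stack.pop()
--             for x in pending:
--                 bag.discard(x)
--             pending = []
--         elif c.islower():
--             if c in bag:
--                 return "No"
--             bag.add(c)
--             pending.append(c)
--     return "Yes"
-- ===== Notes on version B (the rewrite author's own statement) =====
-- stated objective: alternative
-- what changed: A rescans the string backwards from each closing bracket (stopping at the previous closing bracket) to decide which letters leave the bag; B is a single forward pass keeping a pending list of the letters seen since the most recent bracket and discarding exactly those at a closing bracket, so the inner backward index scan disappears.
-- outside the precondition, e.g. on solve('aa)'): A returns 'No', B returns 'No'; on solve(')'): A raises IndexError, B raises IndexError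
import Mathlib
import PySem

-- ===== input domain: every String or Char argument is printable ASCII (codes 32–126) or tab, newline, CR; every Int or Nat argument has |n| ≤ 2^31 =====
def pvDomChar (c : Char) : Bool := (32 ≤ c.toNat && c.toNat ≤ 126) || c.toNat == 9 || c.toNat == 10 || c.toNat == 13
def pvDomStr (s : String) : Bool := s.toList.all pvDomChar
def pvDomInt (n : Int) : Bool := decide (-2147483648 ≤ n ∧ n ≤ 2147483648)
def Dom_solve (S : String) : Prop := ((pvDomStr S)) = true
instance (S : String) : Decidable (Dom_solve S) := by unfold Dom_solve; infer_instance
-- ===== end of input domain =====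

-- B replaces A's quadratic backward rescan at each ')' by a single forward pass that keeps the
-- letters seen since the most recent bracket in a `pending` list (objective: alternative).

-- ===== PORT A =====
-- inner loop 'for n in range(i-1, j, -1): …' of A (break on ')', conditional remove); n counts down
def scanGo (S : List Char) (j : Nat) (bag : PySem.Set Char) (n : Nat) : PySem.Set Char :=
  if n ≤ j then bag
  else if S.getD n ' ' = ')' then bag
  else scanGo S j
    (if PySem.Set.contains bag (S.getD n ' ') then PySem.Set.discard bag (S.getD n ' ') else bag)
    (n - 1)
  termination_by n

-- main loop of A over i in range(len(S)); Python's three independent `if`s have mutually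
-- exclusive conditions ('(' is neither lowercase nor ')'), so the if/else chain is the same tests.
-- On ')' with an empty stack Python raises IndexError (excluded by Pre_solve); the port returns "Yes" there.
def solveGo (S : List Char) (stack : List Nat) (bag : PySem.Set Char) (i : Nat) : String :=
  if h : i < S.length then
    if S.getD i ' ' = '(' then solveGo S (i :: stack) bag (i + 1)
    else if PySem.Chars.islower (S.getD i ' ') then
      if PySem.Set.contains bag (S.getD i ' ') then "No"
      else solveGo S stack (PySem.Set.add bag (S.getD i ' ')) (i + 1)
    else if S.getD i ' ' = ')' then
      match stack with
      | [] => "Yes"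
      | j :: rest => solveGo S rest (scanGo S j bag (i - 1)) (i + 1)
    else solveGo S stack bag (i + 1)
  else "Yes"
  termination_by S.length - i

def solve (S : String) : String := solveGo S.toList [] PySem.Set.empty 0

-- ===== PORT B =====
-- single forward pass of Source B: bracket stack (dummy entries), bag of live letters, and `pending`,
-- the letters collected since the most recent bracket; ')' discards exactly the pending letters.
-- On ')' with an empty stack Python raises IndexError (excluded by Pre_solve); the port returns "Yes" there.
def altGo (stack : List Int) (bag : PySem.Set Char) (pending : List Char) : List Char → String
  | [] => "Yes"
  | c :: rest =>
    if c = '(' then altGo ((0 : Int) :: stack) bag [] rest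
    else if c = ')' then
      match stack with
      | [] => "Yes"
      | _ :: s => altGo s (pending.foldl PySem.Set.discard bag) [] rest
    else if PySem.Chars.islower c then
      if PySem.Set.contains bag c then "No"
      else altGo stack (PySem.Set.add bag c) (pending ++ [c]) rest
    else altGo stack bag pending rest

def solve_alt (S : String) : String := altGo [] PySem.Set.empty [] S.toList

-- ===== PRECONDITION & SPEC =====
-- Pre_solve excludes strings having a prefix with more closing than opening brackets: on such
-- strings A either raises IndexError at the first unmatched closing bracket or returns No earlier
-- on a duplicate letter (and B behaves identically there); Pre_ admits every bracket-prefix-balanced string.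
def Pre_solve (S : String) : Prop :=
  ∀ n < S.toList.length + 1, (S.toList.take n).count ')' ≤ (S.toList.take n).count '('
instance (S : String) : Decidable (Pre_solve S) := by unfold Pre_solve; infer_instance

def pvWitness_solve : String := "(ab)(a(b))"

def Spec_solve (S : String) (out : String) : Prop := out = solve_alt S
instance (S : String) (out : String) : Decidable (Spec_solve S out) := by unfold Spec_solve; infer_instance

-- ===== CLAIM (what is proved, stated in full; the proofs are below) =====
def Claim_equal_solve : Prop := ∀ (S : String), Dom_solve S → Pre_solve S → Spec_solve S (solve S)

-- ===== LEMMAS AND PROOFS =====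

-- a character is a bracket
def isBr (c : Char) : Bool := c = '(' || c = ')'

theorem isBr_of_l {c : Char} (h : c = '(') : isBr c = true := by subst h; rfl
theorem isBr_of_r {c : Char} (h : c = ')') : isBr c = true := by subst h; rfl
theorem isBr_false {c : Char} (h1 : c ≠ '(') (h2 : c ≠ ')') : isBr c = false := by
  simp [isBr, h1, h2]

-- position after the last bracket among the first i characters
def segStart (S : List Char) : Nat → Nat
  | 0 => 0
  | i + 1 => if isBr (S.getD i ' ') then i + 1 else segStart S i

-- the lowercase letters collected since the most recent bracket (Source B's `pending`)
def pendingOf (S : List Char) : Nat → List Char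
  | 0 => []
  | i + 1 =>
    if isBr (S.getD i ' ') then []
    else if PySem.Chars.islower (S.getD i ' ') then pendingOf S i ++ [S.getD i ' ']
    else pendingOf S i

-- the characters at positions m, m+1, …, m+k-1
def segList (S : List Char) (m : Nat) : Nat → List Char
  | 0 => []
  | k + 1 => segList S m k ++ [S.getD (m + k) ' ']

-- the loop invariant tying A's state (stack of indices, bag) to B's (bag, pending)
def LoopInv (S : List Char) (i : Nat) (stack : List Nat) (bag : PySem.Set Char) (pending : List Char) : Prop :=
  stack.Pairwise (· > ·) ∧
  (∀ j ∈ stack, j < i ∧ S.getD j ' ' = '(') ∧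
  stack.length + (S.take i).count ')' = (S.take i).count '(' ∧
  (∀ k, k < i → S.getD k ' ' = '(' → k ∉ stack → ∃ t, k < t ∧ t < i ∧ S.getD t ' ' = ')') ∧
  pending = pendingOf S i ∧
  (∀ y ∈ bag, PySem.Chars.islower y)


-- utility facts about characters
theorem islower_ne_br {c : Char} (h : PySem.Chars.islower c = true) : c ≠ '(' ∧ c ≠ ')' := by
  constructor <;> rintro rfl <;> simp [PySem.Chars.islower] at h

theorem not_br_ne {c : Char} (h : isBr c = false) : c ≠ '(' ∧ c ≠ ')' := by
  constructor <;> rintro rfl <;> simp [isBr] at h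

-- the guarded remove in A's inner loop is Set.discard
theorem guard_discard (bag : PySem.Set Char) (c : Char) :
    (if PySem.Set.contains bag c then PySem.Set.discard bag c else bag) = PySem.Set.discard bag c := by
  by_cases h : c ∈ bag
  · simp [PySem.Set.contains, h]
  · have hd : PySem.Set.discard bag c = bag := by
      unfold PySem.Set.discard
      apply List.filter_eq_self.mpr
      intro y hy
      rw [Bool.not_eq_true', beq_eq_false_iff_ne]
      rintro rfl; exact h hy
    simp [PySem.Set.contains, h, hd]

theorem beq_eq_decide_eq (y x : Char) : (y == x) = decide (y = x) := by
  by_cases h : y = x <;> simp [h]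

-- folding Set.discard over a list is a single filter
theorem foldl_discard_eq_filter (xs : List Char) : ∀ bag : PySem.Set Char,
    xs.foldl PySem.Set.discard bag = bag.filter (fun y => !(decide (y ∈ xs))) := by
  induction xs with
  | nil => intro bag; simp
  | cons x xs ih =>
    intro bag
    simp only [List.foldl_cons, ih]
    show (PySem.Set.discard bag x).filter _ = _
    simp only [PySem.Set.discard, List.filter_filter]
    apply List.filter_congr
    intro y _
    by_cases h1 : y = x <;> by_cases h2 : y ∈ xs <;> simp [h1, h2]
theorem segStart_le (S : List Char) : ∀ i, segStart S i ≤ i := by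
  intro i; induction i with
  | zero => simp [segStart]
  | succ i ih => simp only [segStart]; split <;> omega

theorem segStart_no_br (S : List Char) : ∀ i t, segStart S i ≤ t → t < i → isBr (S.getD t ' ') = false := by
  intro i
  induction i with
  | zero => omega
  | succ i ih =>
    intro t h1 h2
    by_cases hb : isBr (S.getD i ' ') = true
    · rw [show segStart S (i+1) = i + 1 from by simp only [segStart]; rw [if_pos hb]] at h1
      omega
    · rw [show segStart S (i+1) = segStart S i from by simp only [segStart]; rw [if_neg hb]] at h1
      rcases Nat.lt_succ_iff_lt_or_eq.mp h2 with h | rfl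
      · exact ih t h1 h
      · exact Bool.not_eq_true _ ▸ (Bool.eq_false_iff.mpr hb)

theorem lt_segStart_of_br (S : List Char) : ∀ i t, t < i → isBr (S.getD t ' ') = true → t < segStart S i := by
  intro i
  induction i with
  | zero => omega
  | succ i ih =>
    intro t h1 h2
    simp only [segStart]
    split
    · omega
    · rcases Nat.lt_succ_iff_lt_or_eq.mp h1 with h | rfl
      · exact ih t h h2
      · simp_all

theorem br_segStart_pred (S : List Char) : ∀ i, 0 < segStart S i → isBr (S.getD (segStart S i - 1) ' ') = true := by
  intro i
  induction i with
  | zero => simp [segStart]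
  | succ i ih =>
    by_cases hb : isBr (S.getD i ' ') = true
    · rw [show segStart S (i+1) = i + 1 from by simp only [segStart]; rw [if_pos hb]]
      intro _; simpa using hb
    · rw [show segStart S (i+1) = segStart S i from by simp only [segStart]; rw [if_neg hb]]
      exact ih

theorem pendingOf_eq (S : List Char) : ∀ i,
    pendingOf S i = (segList S (segStart S i) (i - segStart S i)).filter PySem.Chars.islower := by
  intro i
  induction i with
  | zero => simp [pendingOf, segStart, segList]
  | succ i ih =>
    by_cases hb : isBr (S.getD i ' ') = true
    · rw [show segStart S (i+1) = i + 1 from by simp only [segStart]; rw [if_pos hb]]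
      rw [show pendingOf S (i+1) = [] from by simp only [pendingOf]; rw [if_pos hb]]
      simp [segList]
    · have hle := segStart_le S i
      rw [show segStart S (i+1) = segStart S i from by simp only [segStart]; rw [if_neg hb]]
      rw [show pendingOf S (i+1) = (if PySem.Chars.islower (S.getD i ' ') = true then pendingOf S i ++ [S.getD i ' '] else pendingOf S i) from by
        simp only [pendingOf]; rw [if_neg hb]]
      rw [show i + 1 - segStart S i = (i - segStart S i) + 1 from by omega]
      simp only [segList, List.filter_append,
        show segStart S i + (i - segStart S i) = i from by omega]
      by_cases hl : PySem.Chars.islower (S.getD i ' ') = true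
      · rw [if_pos hl, ih]
        simp only [List.getD] at hl
        simp [List.filter, hl]
      · rw [if_neg hl, ih]
        simp only [List.getD] at hl
        simp [List.filter, hl]

-- A's backward scan from i-1, stopping at index j or at a ')', is a filter by the trailing segment
theorem scanGo_eq (S : List Char) (i j : Nat)
    (hji : j + 1 ≤ segStart S i)
    (hbr : segStart S i = j + 1 ∨ S.getD (segStart S i - 1) ' ' = ')') :
    ∀ k (bag : PySem.Set Char), segStart S i + k ≤ i →
      scanGo S j bag (segStart S i - 1 + k)
        = bag.filter (fun y => !(decide (y ∈ segList S (segStart S i) k))) := by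
  set m := segStart S i with hm
  intro k
  induction k with
  | zero =>
    intro bag _
    rw [scanGo]
    by_cases hle : m - 1 + 0 ≤ j
    · rw [if_pos hle]; simp [segList]
    · rw [if_neg hle]
      have h2 : S.getD (m - 1 + 0) ' ' = ')' := by
        rcases hbr with h | h
        · omega
        · simpa using h
      rw [if_pos h2]
      simp [segList]
  | succ k ih =>
    intro bag hk
    have hnle : ¬ (m - 1 + (k + 1) ≤ j) := by omega
    have hlt : m + k < i := by omega
    have hnb : isBr (S.getD (m + k) ' ') = false := segStart_no_br S i (m + k) (by omega) hlt
    have hne := not_br_ne hnb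
    rw [scanGo, if_neg hnle]
    rw [show m - 1 + (k + 1) = m + k from by omega]
    rw [if_neg hne.2, guard_discard]
    rw [show m + k - 1 = m - 1 + k from by omega]
    rw [ih (PySem.Set.discard bag (S.getD (m+k) ' ')) (by omega)]
    simp only [PySem.Set.discard, List.filter_filter]
    apply List.filter_congr
    intro y _
    simp only [segList, List.mem_append, List.mem_singleton]
    by_cases h1 : y = S.getD (m+k) ' ' <;> by_cases h2 : y ∈ segList S m k <;>
      simp [h1, h2, beq_eq_decide_eq]

-- counting over one more character of the prefix
theorem count_take_succ (S : List Char) (i : Nat) (h : i < S.length) (x : Char) :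
    (S.take (i+1)).count x = (S.take i).count x + (if S.getD i ' ' = x then 1 else 0) := by
  have h1 : S.take (i+1) = S.take i ++ [S[i]] := by
    rw [List.take_add_one, List.getElem?_eq_getElem h]
    rfl
  rw [h1, List.count_append, List.getD_eq_getElem S ' ' h]
  by_cases hx : S[i] = x <;> simp [hx]

-- unfolding pendingOf one step
theorem pendingOf_succ_br (S : List Char) (i : Nat) (h : isBr (S.getD i ' ') = true) :
    pendingOf S (i+1) = [] := by
  show (if isBr (S.getD i ' ') then []
    else if PySem.Chars.islower (S.getD i ' ') then pendingOf S i ++ [S.getD i ' ']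
    else pendingOf S i) = _
  rw [h]
  simp

theorem pendingOf_succ_lower (S : List Char) (i : Nat) (h : isBr (S.getD i ' ') = false)
    (hl : PySem.Chars.islower (S.getD i ' ') = true) :
    pendingOf S (i+1) = pendingOf S i ++ [S.getD i ' '] := by
  show (if isBr (S.getD i ' ') then []
    else if PySem.Chars.islower (S.getD i ' ') then pendingOf S i ++ [S.getD i ' ']
    else pendingOf S i) = _
  rw [h, hl]
  simp

theorem pendingOf_succ_other (S : List Char) (i : Nat) (h : isBr (S.getD i ' ') = false)
    (hl : PySem.Chars.islower (S.getD i ' ') = false) :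
    pendingOf S (i+1) = pendingOf S i := by
  show (if isBr (S.getD i ' ') then []
    else if PySem.Chars.islower (S.getD i ' ') then pendingOf S i ++ [S.getD i ' ']
    else pendingOf S i) = _
  rw [h, hl]
  simp

-- one-step unfoldings of altGo
theorem altGo_cons_l (stack : List Int) (bag : PySem.Set Char) (pending : List Char)
    (c : Char) (rest : List Char) (h : c = '(') :
    altGo stack bag pending (c :: rest) = altGo ((0:Int) :: stack) bag [] rest := by
  simp only [altGo]; rw [if_pos h]

theorem altGo_cons_r (x : Int) (s : List Int) (bag : PySem.Set Char) (pending : List Char)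
    (c : Char) (rest : List Char) (h : c = ')') :
    altGo (x :: s) bag pending (c :: rest)
      = altGo s (pending.foldl PySem.Set.discard bag) [] rest := by
  simp only [altGo]; rw [if_neg (by rw [h]; decide), if_pos h]

theorem altGo_cons_low (stack : List Int) (bag : PySem.Set Char) (pending : List Char)
    (c : Char) (rest : List Char) (hl : PySem.Chars.islower c = true) :
    altGo stack bag pending (c :: rest)
      = (if PySem.Set.contains bag c then "No"
         else altGo stack (PySem.Set.add bag c) (pending ++ [c]) rest) := by
  have hne := islower_ne_br hl
  simp only [altGo]; rw [if_neg hne.1, if_neg hne.2, if_pos hl]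

theorem altGo_cons_other (stack : List Int) (bag : PySem.Set Char) (pending : List Char)
    (c : Char) (rest : List Char) (h1 : c ≠ '(') (h2 : c ≠ ')')
    (h3 : PySem.Chars.islower c = false) :
    altGo stack bag pending (c :: rest) = altGo stack bag pending rest := by
  simp only [altGo]; rw [if_neg h1, if_neg h2, if_neg (by simp [h3])]

-- the main simulation: A's loop from position i equals B's loop on the remaining characters
theorem mainEq (S : List Char)
    (hpre : ∀ n < S.length + 1, (S.take n).count ')' ≤ (S.take n).count '(') :
    ∀ N i stack bag pending, S.length - i ≤ N → i ≤ S.length → LoopInv S i stack bag pending →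
      solveGo S stack bag i = altGo (stack.map fun _ => (0:Int)) bag pending (S.drop i) := by
  intro N
  induction N with
  | zero =>
    intro i stack bag pending hN hi _
    have : i = S.length := by omega
    subst this
    rw [solveGo.eq_def]
    simp [List.drop_length, altGo]
  | succ N ih =>
    intro i stack bag pending hN hi hInv
    by_cases h : i < S.length
    · obtain ⟨hPW, hElem, hCnt, hOpen, hPend, hLow⟩ := hInv
      have hdrop : S.drop i = S.getD i ' ' :: S.drop (i+1) := by
        rw [List.drop_eq_getElem_cons h, List.getD_eq_getElem S ' ' h]
      rw [solveGo.eq_def, hdrop]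
      simp only [h, dif_pos]
      by_cases hc1 : S.getD i ' ' = '('
      · -- push
        rw [if_pos hc1]
        rw [altGo_cons_l _ _ _ _ _ hc1]
        have hstep := ih (i+1) (i :: stack) bag [] (by omega) (by omega) ?_
        · simpa using hstep
        · refine ⟨?_, ?_, ?_, ?_, ?_, hLow⟩
          · exact List.pairwise_cons.mpr ⟨fun x hx => (hElem x hx).1, hPW⟩
          · intro j hj
            rcases List.mem_cons.mp hj with rfl | hj'
            · exact ⟨by omega, hc1⟩
            · exact ⟨by have := (hElem j hj').1; omega, (hElem j hj').2⟩
          · rw [count_take_succ S i h, count_take_succ S i h,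
              if_pos hc1, if_neg (by rw [hc1]; decide)]
            simp only [List.length_cons]
            omega
          · intro k hk hk2 hk3
            rcases Nat.lt_succ_iff_lt_or_eq.mp hk with hlt | rfl
            · obtain ⟨t, ht⟩ := hOpen k hlt hk2 (fun hmem => hk3 (List.mem_cons_of_mem _ hmem))
              exact ⟨t, ht.1, by omega, ht.2.2⟩
            · exact absurd List.mem_cons_self hk3
          · exact (pendingOf_succ_br S i (isBr_of_l hc1)).symm
      · by_cases hl : PySem.Chars.islower (S.getD i ' ') = true
        · -- lowercase
          have hne := islower_ne_br hl
          rw [if_neg hc1, if_pos hl]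
          rw [altGo_cons_low _ _ _ _ _ hl]
          by_cases hmem : PySem.Set.contains bag (S.getD i ' ') = true
          · rw [if_pos hmem, if_pos hmem]
          · rw [if_neg hmem, if_neg hmem]
            exact ih (i+1) stack (PySem.Set.add bag (S.getD i ' ')) (pending ++ [S.getD i ' '])
              (by omega) (by omega)
              ⟨hPW,
               fun j hj => ⟨by have := (hElem j hj).1; omega, (hElem j hj).2⟩,
               by rw [count_take_succ S i h, count_take_succ S i h,
                    if_neg hne.1, if_neg hne.2]; omega,
               by
                 intro k hk hk2 hk3
                 rcases Nat.lt_succ_iff_lt_or_eq.mp hk with hlt | rfl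
                 · obtain ⟨t, ht⟩ := hOpen k hlt hk2 hk3
                   exact ⟨t, ht.1, by omega, ht.2.2⟩
                 · exact absurd hk2 hne.1,
               by rw [pendingOf_succ_lower S i (isBr_false hne.1 hne.2) hl, hPend],
               by
                 intro y hy
                 rcases (PySem.Set.mem_add bag (S.getD i ' ') y).mp hy with hy' | rfl
                 · exact hLow y hy'
                 · exact hl⟩
        · by_cases hc2 : S.getD i ' ' = ')'
          · -- closing bracket
            rw [if_neg hc1, if_neg hl, if_pos hc2]
            -- the stack is nonempty thanks to Pre_
            have hstk : stack ≠ [] := by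
              intro hnil
              have h1 := hpre (i+1) (by omega)
              rw [count_take_succ S i h, count_take_succ S i h,
                if_pos hc2, if_neg (by rw [hc2]; decide)] at h1
              rw [hnil] at hCnt
              simp at hCnt
              omega
            obtain ⟨j, rest, rfl⟩ := List.exists_cons_of_ne_nil hstk
            rw [List.map_cons, altGo_cons_r _ _ _ _ _ _ hc2]
            show solveGo S rest (scanGo S j bag (i - 1)) (i + 1) = _
            have hj := hElem j List.mem_cons_self
            have hjm : j + 1 ≤ segStart S i :=
              lt_segStart_of_br S i j hj.1 (isBr_of_l hj.2)
            have hmi : segStart S i ≤ i := segStart_le S i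
            have hbr : segStart S i = j + 1 ∨ S.getD (segStart S i - 1) ' ' = ')' := by
              have hb := br_segStart_pred S i (by omega)
              by_cases hjm1 : segStart S i - 1 = j
              · left; omega
              · right
                have hdico : S.getD (segStart S i - 1) ' ' = '(' ∨
                    S.getD (segStart S i - 1) ' ' = ')' := by
                  have hb' := hb
                  simp [isBr] at hb'
                  exact hb'
                rcases hdico with hpar | hpar
                · exfalso
                  have hnotmem : (segStart S i - 1) ∉ j :: rest := by
                    intro hmem
                    rcases List.mem_cons.mp hmem with heq | hmem'
                    · exact hjm1 heq
                    · have := List.rel_of_pairwise_cons hPW hmem'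
                      omega
                  obtain ⟨t, ht1, ht2, ht3⟩ := hOpen (segStart S i - 1) (by omega) hpar hnotmem
                  have := segStart_no_br S i t (by omega) ht2
                  simp [isBr] at this
                  exact this.2 ht3
                · exact hpar
            have hscan := scanGo_eq S i j hjm hbr (i - segStart S i) bag (by omega)
            rw [show segStart S i - 1 + (i - segStart S i) = i - 1 from by omega] at hscan
            rw [hscan, foldl_discard_eq_filter]
            rw [show bag.filter (fun y => !(decide (y ∈ segList S (segStart S i) (i - segStart S i))))
                = bag.filter (fun y => !(decide (y ∈ pending))) from by
              apply List.filter_congr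
              intro y hy
              rw [hPend, pendingOf_eq]
              simp [List.mem_filter, hLow y hy]]
            refine ih (i+1) rest (bag.filter (fun y => !(decide (y ∈ pending)))) []
              (by omega) (by omega)
              ⟨hPW.of_cons, ?_, ?_, ?_, ?_, ?_⟩
            · intro x hx
              exact ⟨by have := (hElem x (List.mem_cons_of_mem _ hx)).1; omega,
                (hElem x (List.mem_cons_of_mem _ hx)).2⟩
            · rw [count_take_succ S i h, count_take_succ S i h,
                if_pos hc2, if_neg hc1]
              simp only [List.length_cons] at hCnt
              omega
            · intro k hk hk2 hk3
              rcases Nat.lt_succ_iff_lt_or_eq.mp hk with hlt | rfl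
              · by_cases hkj : k = j
                · exact ⟨i, by omega, by omega, hc2⟩
                · have hknot : k ∉ j :: rest := by
                    intro hmem
                    rcases List.mem_cons.mp hmem with heq | hmem'
                    · exact hkj heq
                    · exact hk3 hmem'
                  obtain ⟨t, ht⟩ := hOpen k hlt hk2 hknot
                  exact ⟨t, ht.1, by omega, ht.2.2⟩
              · exact absurd hk2 hc1
            · exact (pendingOf_succ_br S i (isBr_of_r hc2)).symm
            · intro y hy
              exact hLow y (List.mem_of_mem_filter hy)
          · -- any other character
            rw [if_neg hc1, if_neg hl, if_neg hc2]
            rw [altGo_cons_other _ _ _ _ _ hc1 hc2 (by rw [Bool.eq_false_iff]; exact fun hh => hl hh)]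
            refine ih (i+1) stack bag pending (by omega) (by omega)
              ⟨hPW, fun j hj => ⟨by have := (hElem j hj).1; omega, (hElem j hj).2⟩, ?_, ?_, ?_, hLow⟩
            · rw [count_take_succ S i h, count_take_succ S i h, if_neg hc1, if_neg hc2]
              omega
            · intro k hk hk2 hk3
              rcases Nat.lt_succ_iff_lt_or_eq.mp hk with hlt | rfl
              · obtain ⟨t, ht⟩ := hOpen k hlt hk2 hk3
                exact ⟨t, ht.1, by omega, ht.2.2⟩
              · exact absurd hk2 hc1
            · rw [pendingOf_succ_other S i (isBr_false hc1 hc2) (by rw [Bool.eq_false_iff]; exact fun hh => hl hh), hPend]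
    · have hieq : i = S.length := by omega
      subst hieq
      rw [solveGo.eq_def]
      simp [List.drop_length, altGo]

-- ===== VERDICT (by name: the statement is the Claim_ definition above) =====
theorem solve_spec : Claim_equal_solve := by
  intro S _ hpre
  unfold Spec_solve solve solve_alt
  have := mainEq S.toList hpre S.toList.length 0 [] PySem.Set.empty []
    (by omega) (by omega)
    ⟨List.Pairwise.nil, by simp, by simp, by omega, rfl, by simp [PySem.Set.empty]⟩
  simpa [PySem.Set.empty] using this
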